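-- pv_equiv track=rewrite | github.com/broadinstitute/gatk-sv | src/sv-pipeline/04_variant_resolution/scripts/clean_vcf_part3.py | assign_shards
-- ===== SOURCE A (Python) =====
-- def assign_shards(variant_counts, max_samples):
--     shard_assignments = {}
--     shard_number = 0
--     sample_counter = 0
--     first = True
--     for variant in variant_counts.keys():
--         if not first and (sample_counter + variant_counts[variant] > max_samples):
--             shard_number += 1
--             sample_counter = 0
--         shard_assignments[variant] = shard_number
--         sample_counter += variant_counts[variant]
--         first = False
--     return shard_number, shard_assignments
-- ===== SOURCE B (Python) =====
-- def assign_shards(variant_counts, max_samples):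
--     items = list(variant_counts.items())
--     n = len(items)
--     # phase 1: compute the start index of every shard by scanning each
--     # maximal run whose running sample sum stays within max_samples
--     starts = []
--     i = 0
--     while i < n:
--         starts.append(i)
--         s = items[i][1]
--         i += 1
--         while i < n and s + items[i][1] <= max_samples:
--             s += items[i][1]
--             i += 1
--     starts.append(n)
--     # phase 2: number each boundary interval and label its variants
--     shard_assignments = {}
--     sh = 0
--     for a, b in zip(starts, starts[1:]):
--         for k in range(a, b):
--             shard_assignments[items[k][0]] = sh
--         sh += 1
--     return max(len(starts) - 2, 0), shard_assignments
-- ===== Notes on version B (the rewrite author's own statement) =====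
-- stated objective: alternative
-- what changed: Replaces A's single stateful per-element loop (first-flag, running counter reset mid-loop) by an index-based two-phase algorithm: a nested scan that records the start index of each maximal within-limit run, then an interval-numbering pass over consecutive boundary pairs.
import Mathlib
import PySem

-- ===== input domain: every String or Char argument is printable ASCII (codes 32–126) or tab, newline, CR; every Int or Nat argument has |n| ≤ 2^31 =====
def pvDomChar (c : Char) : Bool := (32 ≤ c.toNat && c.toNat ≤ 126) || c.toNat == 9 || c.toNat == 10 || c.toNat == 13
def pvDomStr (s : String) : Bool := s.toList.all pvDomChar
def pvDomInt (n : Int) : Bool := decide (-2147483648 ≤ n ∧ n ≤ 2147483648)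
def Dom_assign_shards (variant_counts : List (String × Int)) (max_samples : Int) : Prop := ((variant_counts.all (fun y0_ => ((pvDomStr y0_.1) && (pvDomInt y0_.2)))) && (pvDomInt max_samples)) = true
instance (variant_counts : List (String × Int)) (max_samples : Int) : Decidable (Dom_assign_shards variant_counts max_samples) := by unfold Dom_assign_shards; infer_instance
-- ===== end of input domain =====

-- B replaces A's stateful per-element loop by an index-based two-phase algorithm
-- (boundary scan, then interval numbering); same cost, no speed claim.

-- ===== PORT A =====
-- one loop iteration of A: maybe advance the shard, then record the assignment
def stepA (d : PySem.Dict String Int) (max_samples : Int)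
    (s : PySem.Dict String Int × Int × Int × Bool) (variant : String) :
    PySem.Dict String Int × Int × Int × Bool :=
  let (shard_assignments, shard_number, sample_counter, first) := s
  let (shard_number, sample_counter) :=
    if first = false ∧ sample_counter + d.getD variant 0 > max_samples
    then (shard_number + 1, (0 : Int)) else (shard_number, sample_counter)
  (shard_assignments.insert variant shard_number, shard_number,
    sample_counter + d.getD variant 0, false)

def assign_shards (variant_counts : List (String × Int)) (max_samples : Int) : Int × (List (String × Int)) :=
  let d := PySem.Dict.ofList variant_counts
  let st := d.keys.foldl (stepA d max_samples) (PySem.Dict.empty, 0, 0, true)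
  (st.2.1, st.1.items)

-- ===== PORT B =====
-- inner `while i < n and s + items[i][1] <= max_samples` scan
-- (fuel = a bound on the remaining iterations, items.length suffices; it only makes the loop total)
def pvInner (items : List (String × Int)) (ms : Int) : Nat → Int → Nat → Nat
  | 0, _, i => i
  | fuel + 1, s, i =>
    if h : i < items.length then
      if s + (items[i]'h).2 ≤ ms then pvInner items ms fuel (s + (items[i]'h).2) (i + 1)
      else i
    else i

-- outer `while i < n` loop: collect the start index of each run (same fuel convention)
def pvOuter (items : List (String × Int)) (ms : Int) : Nat → Nat → List Nat → List Nat
  | 0, _, starts => starts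
  | fuel + 1, i, starts =>
    if h : i < items.length then
      pvOuter items ms fuel (pvInner items ms items.length (items[i]'h).2 (i + 1)) (starts ++ [i])
    else starts

-- body of `for a, b in zip(starts, starts[1:])`: label range(a, b), bump sh
def pvNumStep (items : List (String × Int)) (st : PySem.Dict String Int × Int)
    (ab : Nat × Nat) : PySem.Dict String Int × Int :=
  ((List.range' ab.1 (ab.2 - ab.1)).foldl
      (fun d k => d.insert (items.getD k ("", 0)).1 st.2) st.1, st.2 + 1)

def pvNumber (items : List (String × Int)) (starts : List Nat) : PySem.Dict String Int × Int :=
  (starts.zip starts.tail).foldl (pvNumStep items) (PySem.Dict.empty, 0)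

def assign_shards_alt (variant_counts : List (String × Int)) (max_samples : Int) : Int × (List (String × Int)) :=
  let items := (PySem.Dict.ofList variant_counts).items
  let starts := pvOuter items max_samples (items.length + 1) 0 [] ++ [items.length]
  let st := pvNumber items starts
  (max ((starts.length : Int) - 2) 0, st.1.items)

-- ===== PRECONDITION & SPEC =====
def Spec_assign_shards (variant_counts : List (String × Int)) (max_samples : Int) (out : Int × (List (String × Int))) : Prop := out = assign_shards_alt variant_counts max_samples
instance (variant_counts : List (String × Int)) (max_samples : Int) (out : Int × (List (String × Int))) : Decidable (Spec_assign_shards variant_counts max_samples out) := by unfold Spec_assign_shards; infer_instance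

-- ===== CLAIM (what is proved, stated in full; the proofs are below) =====
def Claim_equal_assign_shards : Prop := ∀ (variant_counts : List (String × Int)) (max_samples : Int), Dom_assign_shards variant_counts max_samples → Spec_assign_shards variant_counts max_samples (assign_shards variant_counts max_samples)

-- ===== LEMMAS AND PROOFS =====

-- A's step rewritten on an items pair (equals stepA when p = (k, d.getD k 0))
def stepAP (max_samples : Int) (s : PySem.Dict String Int × Int × Int × Bool)
    (p : String × Int) : PySem.Dict String Int × Int × Int × Bool :=
  let (sa, sn, sc, first) := s
  let (sn, sc) :=
    if first = false ∧ sc + p.2 > max_samples then (sn + 1, (0 : Int)) else (sn, sc)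
  (sa.insert p.1 sn, sn, sc + p.2, false)

lemma foldA_eq_foldAP (d : PySem.Dict String Int) (ms : Int) (hnd : d.keys.Nodup) (init : PySem.Dict String Int × Int × Int × Bool) :
    d.keys.foldl (stepA d ms) init = d.items.foldl (stepAP ms) init := by
  rw [PySem.Dict.items_eq_map_keys d hnd 0, List.foldl_map]
  have h : (fun (s : PySem.Dict String Int × Int × Int × Bool) (k : String) =>
      stepAP ms s (k, d.getD k 0)) = stepA d ms := by
    funext s k
    obtain ⟨sa, sn, sc, first⟩ := s
    rfl
  rw [h]

-- length of the maximal run extension starting with running sum s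
def takeLen (ms : Int) : Int → List (String × Int) → Nat
  | _, [] => 0
  | s, p :: t => if s + p.2 ≤ ms then takeLen ms (s + p.2) t + 1 else 0

lemma takeLen_le (ms : Int) : ∀ (t : List (String × Int)) (s : Int), takeLen ms s t ≤ t.length := by
  intro t
  induction t with
  | nil => intro s; simp [takeLen]
  | cons p t ih =>
    intro s
    simp only [takeLen, List.length_cons]
    split
    · have := ih (s + p.2); omega
    · omega

-- the greedy runs, as lists of items
def chunksF (ms : Int) : List (String × Int) → List (List (String × Int))
  | [] => []
  | p :: t => (p :: t.take (takeLen ms p.2 t)) :: chunksF ms (t.drop (takeLen ms p.2 t))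
termination_by xs => xs.length
decreasing_by
  simp only [List.length_drop, List.length_cons]
  omega

-- the run start indices, starting at index i
def bnds (ms : Int) : List (String × Int) → Nat → List Nat
  | [], _ => []
  | p :: t, i => i :: bnds ms (t.drop (takeLen ms p.2 t)) (i + takeLen ms p.2 t + 1)
termination_by xs _ => xs.length
decreasing_by
  simp only [List.length_drop, List.length_cons]
  omega

lemma bnds_len (ms : Int) : ∀ (m : Nat) (xs : List (String × Int)) (i : Nat), xs.length ≤ m →
    (bnds ms xs i).length = (chunksF ms xs).length := by
  intro m
  induction m with
  | zero =>
    intro xs i h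
    have hx : xs = [] := List.eq_nil_of_length_eq_zero (by omega)
    subst hx
    rw [bnds, chunksF]
    rfl
  | succ m ih =>
    intro xs i h
    cases xs with
    | nil => rw [bnds, chunksF]; rfl
    | cons p t =>
      rw [bnds, chunksF]
      simp only [List.length_cons]
      have hle : (t.drop (takeLen ms p.2 t)).length ≤ m := by
        simp only [List.length_drop]
        simp only [List.length_cons] at h
        omega
      rw [ih _ _ hle]

-- number the runs c, c+1, …, inserting every item of each run
def numFold : List (List (String × Int)) → Int → PySem.Dict String Int → PySem.Dict String Int
  | [], _, d => d
  | g :: gs, c, d => numFold gs (c + 1) (g.foldl (fun d q => d.insert q.1 c) d)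

-- pvInner computes i + takeLen on the suffix (fuel large enough)
lemma pvInner_eq (items : List (String × Int)) (ms : Int) :
    ∀ (fuel i : Nat) (s : Int), items.length - i ≤ fuel →
    pvInner items ms fuel s i = i + takeLen ms s (items.drop i) := by
  intro fuel
  induction fuel with
  | zero =>
    intro i s h
    have hd : items.drop i = [] := List.drop_eq_nil_of_le (by omega)
    simp [pvInner, hd, takeLen]
  | succ fuel ih =>
    intro i s h
    rw [pvInner]
    split
    · rename_i hi
      rw [List.drop_eq_getElem_cons hi]
      simp only [takeLen]
      by_cases hle : s + (items[i]'hi).2 ≤ ms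
      · rw [if_pos hle, if_pos hle, ih (i + 1) _ (by omega)]
        omega
      · rw [if_neg hle, if_neg hle]
        omega
    · rename_i hi
      have hd : items.drop i = [] := List.drop_eq_nil_of_le (by omega)
      simp [hd, takeLen]

-- pvOuter collects exactly the run start indices (fuel large enough)
lemma pvOuter_eq (items : List (String × Int)) (ms : Int) :
    ∀ (fuel i : Nat) (acc : List Nat), items.length - i ≤ fuel →
    pvOuter items ms fuel i acc = acc ++ bnds ms (items.drop i) i := by
  intro fuel
  induction fuel with
  | zero =>
    intro i acc h
    have hd : items.drop i = [] := List.drop_eq_nil_of_le (by omega)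
    rw [pvOuter, hd, bnds]
    simp
  | succ fuel ih =>
    intro i acc h
    rw [pvOuter]
    split
    · rename_i hi
      rw [pvInner_eq items ms items.length (i + 1) _ (by omega)]
      set j := takeLen ms (items[i]'hi).2 (items.drop (i + 1)) with hj
      rw [ih (i + 1 + j) (acc ++ [i]) (by omega)]
      rw [List.drop_eq_getElem_cons hi, bnds, ← hj]
      have hdd : (items.drop (i + 1)).drop j = items.drop (i + 1 + j) := by
        rw [List.drop_drop]
      rw [hdd]
      have he : i + 1 + j = i + j + 1 := by omega
      rw [he]
      simp
    · rename_i hi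
      have hd : items.drop i = [] := List.drop_eq_nil_of_le (by omega)
      rw [hd, bnds]
      simp

-- a range'-indexed fold over items is a fold over the corresponding slice
lemma foldl_range'_getD {β : Type} (items : List (String × Int)) (f : β → (String × Int) → β) :
    ∀ (l a : Nat) (d : β), a + l ≤ items.length →
    (List.range' a l).foldl (fun d k => f d (items.getD k ("", 0))) d
      = ((items.drop a).take l).foldl f d := by
  intro l
  induction l with
  | zero => intro a d h; simp
  | succ l ih =>
    intro a d h
    have ha : a < items.length := by omega
    rw [List.range'_succ, List.foldl_cons, List.drop_eq_getElem_cons ha]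
    simp only [List.take_succ_cons, List.foldl_cons]
    rw [List.getD_eq_getElem items ("", 0) ha]
    exact ih (a + 1) _ (by omega)

-- within a run, A never resets: it inserts every item with the current shard
lemma A_chunk (ms : Int) : ∀ (t : List (String × Int)) (s : Int) (sn : Int) (sa : PySem.Dict String Int),
    (t.take (takeLen ms s t)).foldl (stepAP ms) (sa, sn, s, false)
      = ((t.take (takeLen ms s t)).foldl (fun d q => d.insert q.1 sn) sa, sn,
         s + (((t.take (takeLen ms s t)).map Prod.snd).sum), false) := by
  intro t
  induction t with
  | nil => intro s sn sa; simp [takeLen]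
  | cons q t ih =>
    intro s sn sa
    simp only [takeLen]
    split
    · rename_i hle
      simp only [List.take_succ_cons, List.foldl_cons, List.map_cons, List.sum_cons]
      have hstep : stepAP ms (sa, sn, s, false) q = (sa.insert q.1 sn, sn, s + q.2, false) := by
        simp only [stepAP]
        rw [if_neg (fun hcon => absurd hcon.2 (by omega))]
      rw [hstep, ih (s + q.2) sn (sa.insert q.1 sn)]
      simp only [Prod.mk.injEq, true_and, and_true]
      ring
    · simp

-- when the run stops with items remaining, the next item overflows
lemma A_stop (ms : Int) : ∀ (t : List (String × Int)) (s : Int) (q : String × Int) (t'' : List (String × Int)),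
    t.drop (takeLen ms s t) = q :: t'' →
    ms < s + (((t.take (takeLen ms s t)).map Prod.snd).sum) + q.2 := by
  intro t
  induction t with
  | nil => intro s q t'' h; simp [takeLen] at h
  | cons r t ih =>
    intro s q t'' h
    simp only [takeLen] at h ⊢
    by_cases hle : s + r.2 ≤ ms
    · rw [if_pos hle] at h ⊢
      rw [List.drop_succ_cons] at h
      have := ih (s + r.2) q t'' h
      simp only [List.take_succ_cons, List.map_cons, List.sum_cons]
      omega
    · rw [if_neg hle] at h ⊢
      rw [List.drop_zero] at h
      injection h with h1 h2
      subst h1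
      simp only [List.take_zero, List.map_nil, List.sum_nil]
      omega

-- A's fold, starting just after the head of a fresh run was recorded
lemma A_run (ms : Int) : ∀ (m : Nat) (t : List (String × Int)), t.length ≤ m →
    ∀ (p : String × Int) (sn : Int) (sa : PySem.Dict String Int),
    ∃ sc : Int,
    t.foldl (stepAP ms) (sa.insert p.1 sn, sn, p.2, false)
      = (numFold (chunksF ms (p :: t)) sn sa,
         sn + ((chunksF ms (p :: t)).length : Int) - 1, sc, false) := by
  intro m
  induction m with
  | zero =>
    intro t ht p sn sa
    have hx : t = [] := List.eq_nil_of_length_eq_zero (by omega)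
    subst hx
    refine ⟨p.2, ?_⟩
    rw [chunksF]
    simp [takeLen, numFold, chunksF]
  | succ m ih =>
    intro t ht p sn sa
    set j := takeLen ms p.2 t with hj
    have hA := A_chunk ms t p.2 sn (sa.insert p.1 sn)
    rw [← hj] at hA
    cases hdrop : t.drop j with
    | nil =>
      have hjlen : t.length ≤ j := by
        have := congrArg List.length hdrop
        simp only [List.length_drop, List.length_nil] at this
        have := takeLen_le ms t p.2
        omega
      have htake : t.take j = t := List.take_of_length_le hjlen
      rw [htake] at hA
      have hchunks : chunksF ms (p :: t) = [p :: t] := by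
        rw [chunksF, ← hj, htake, hdrop, chunksF]
      refine ⟨p.2 + ((t.map Prod.snd).sum), ?_⟩
      rw [hA, hchunks]
      simp [numFold]
    | cons q t'' =>
      have hstop := A_stop ms t p.2 q t''
      rw [← hj] at hstop
      have hstop := hstop hdrop
      have hfold : t.foldl (stepAP ms) (sa.insert p.1 sn, sn, p.2, false)
          = (t.drop j).foldl (stepAP ms)
              ((t.take j).foldl (stepAP ms) (sa.insert p.1 sn, sn, p.2, false)) := by
        conv_lhs => rw [← List.take_append_drop j t]
        rw [List.foldl_append]
      have ht'' : t''.length ≤ m := by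
        have := congrArg List.length hdrop
        simp only [List.length_drop, List.length_cons] at this
        have := takeLen_le ms t p.2
        omega
      set D1 := (t.take j).foldl (fun d q => d.insert q.1 sn) (sa.insert p.1 sn) with hD1
      have hqstep : stepAP ms (D1, sn, p.2 + ((t.take j).map Prod.snd).sum, false) q
          = (D1.insert q.1 (sn + 1), sn + 1, q.2, false) := by
        simp only [stepAP]
        rw [if_pos (by exact ⟨trivial, by omega⟩)]
        norm_num
      obtain ⟨sc, hrec⟩ := ih t'' ht'' q (sn + 1) D1
      have hchunks : chunksF ms (p :: t) = (p :: t.take j) :: chunksF ms (q :: t'') := by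
        rw [chunksF, ← hj, hdrop]
      refine ⟨sc, ?_⟩
      rw [hfold, hA, hdrop, List.foldl_cons, hqstep, hrec, hchunks]
      simp only [numFold, List.foldl_cons, List.length_cons]
      rw [← hD1]
      simp only [Prod.mk.injEq, true_and, and_true]
      push_cast
      ring

-- B's numbering pass equals the run-wise numbering fold
lemma B_num (items : List (String × Int)) (ms : Int) :
    ∀ (m : Nat) (xs : List (String × Int)) (i : Nat), xs.length ≤ m →
    xs = items.drop i → i + xs.length = items.length →
    ∀ (d : PySem.Dict String Int) (c : Int),
    ((bnds ms xs i ++ [items.length]).zip (bnds ms xs i ++ [items.length]).tail).foldl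
        (pvNumStep items) (d, c)
      = (numFold (chunksF ms xs) c d, c + ((chunksF ms xs).length : Int)) := by
  intro m
  induction m with
  | zero =>
    intro xs i hm hx hi d c
    have hx0 : xs = [] := List.eq_nil_of_length_eq_zero (by omega)
    subst hx0
    rw [bnds, chunksF]
    simp [numFold]
  | succ m ih =>
    intro xs i hm hx hi d c
    cases xs with
    | nil =>
      rw [bnds, chunksF]
      simp [numFold]
    | cons p t =>
      set j := takeLen ms p.2 t with hj
      have hjle : j ≤ t.length := by rw [hj]; exact takeLen_le ms t p.2
      simp only [List.length_cons] at hi hm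
      have hiL : i < items.length := by omega
      have hdropi : items.drop i = p :: t := hx.symm
      have hdrop1 : items.drop (i + 1) = t := by
        have : items.drop (i + 1) = (items.drop i).drop 1 := by
          rw [List.drop_drop]
        rw [this, hdropi, List.drop_succ_cons, List.drop_zero]
      have hdropn : items.drop (i + j + 1) = t.drop j := by
        have : items.drop (i + j + 1) = (items.drop (i + 1)).drop j := by
          rw [List.drop_drop]
          congr 1
          omega
        rw [this, hdrop1]
      rw [bnds, ← hj]
      -- the list of start boundaries for the tail
      set L := bnds ms (t.drop j) (i + j + 1) ++ [items.length] with hL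
      have hLhead : L = (i + j + 1) :: L.tail := by
        rw [hL]
        cases hcase : t.drop j with
        | nil =>
          have : t.length ≤ j := by
            have := congrArg List.length hcase
            simp only [List.length_drop, List.length_nil] at this
            omega
          have hjeq : j = t.length := by omega
          rw [bnds]
          simp
          omega
        | cons q t'' =>
          rw [bnds]
          simp
      have hzip : ((i :: (bnds ms (t.drop j) (i + j + 1))) ++ [items.length]).zip
            (((i :: (bnds ms (t.drop j) (i + j + 1))) ++ [items.length]).tail)
          = (i, i + j + 1) :: (L.zip L.tail) := by
        simp only [List.cons_append, List.tail_cons, ← hL]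
        rw [hLhead]
        rw [List.zip_cons_cons, ← hLhead]
      rw [hzip, List.foldl_cons]
      -- evaluate the head interval step
      have hstep : pvNumStep items (d, c) (i, i + j + 1)
          = ((p :: t.take j).foldl (fun d q => d.insert q.1 c) d, c + 1) := by
        simp only [pvNumStep]
        have hr : (i + j + 1) - i = j + 1 := by omega
        rw [hr]
        congr 1
        have := foldl_range'_getD items (fun d (q : String × Int) => d.insert q.1 c)
          (j + 1) i d (by omega)
        rw [this, hdropi]
        simp
      rw [hstep]
      have hrec := ih (t.drop j) (i + j + 1) (by simp only [List.length_drop]; omega)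
        hdropn.symm (by simp only [List.length_drop]; omega)
        ((p :: t.take j).foldl (fun d q => d.insert q.1 c) d) (c + 1)
      rw [← hL] at hrec
      have hchunks : chunksF ms (p :: t) = (p :: t.take j) :: chunksF ms (t.drop j) := by
        rw [chunksF, ← hj]
      rw [hrec, hchunks]
      simp only [numFold, List.length_cons, Prod.mk.injEq, true_and]
      push_cast
      ring

-- ===== VERDICT (by name: the statement is the Claim_ definition above) =====
theorem assign_shards_spec : Claim_equal_assign_shards := by
  intro vc ms _
  show assign_shards vc ms = assign_shards_alt vc ms
  simp only [assign_shards, assign_shards_alt]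
  rw [foldA_eq_foldAP _ _ (PySem.Dict.nodup_keys_ofList vc)]
  generalize (PySem.Dict.ofList vc).items = items
  rw [pvOuter_eq items ms (items.length + 1) 0 [] (by omega), List.drop_zero, List.nil_append]
  cases items with
  | nil =>
    rw [bnds]
    simp [pvNumber]
  | cons p t =>
    -- A side: peel the first element (first = true: no reset)
    have hfirst : stepAP ms (PySem.Dict.empty, 0, 0, true) p
        = (PySem.Dict.empty.insert p.1 0, 0, p.2, false) := by
      simp only [stepAP]
      rw [if_neg (by simp)]
      norm_num
    obtain ⟨sc, hA⟩ := A_run ms t.length t (le_refl _) p 0 PySem.Dict.empty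
    have hB := B_num (p :: t) ms (p :: t).length (p :: t) 0 (le_refl _) (by simp) (by simp)
      PySem.Dict.empty 0
    have hlen1 : 1 ≤ (chunksF ms (p :: t)).length := by
      rw [chunksF]
      simp
    rw [List.foldl_cons, hfirst, hA]
    simp only [pvNumber]
    rw [hB]
    have hblen : (bnds ms (p :: t) 0).length = (chunksF ms (p :: t)).length :=
      bnds_len ms (p :: t).length (p :: t) 0 (le_refl _)
    simp only [Prod.mk.injEq, and_true]
    simp only [List.length_append, List.length_cons, List.length_nil, hblen]
    rw [max_eq_left (by push_cast; omega)]
    push_cast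
    ring
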